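-- pv_equiv track=rewrite | github.com/guigui55-ok/Repository4_python | csv_json_test2/str_exact_json.py | sepalate_value
-- ===== SOURCE A (Python) =====
-- def sepalate_value(lines:list[str],sepalete_list:list[str]):
--     line_blocks:list[list[str]] = []
--     line_block:list[str] = []
--     for i in range(len(lines)):
--         line = lines[i]
--         if is_match_in_list(line,sepalete_list):
--             line_blocks.append(line_block)
--             line_block = []
--         else:
--             pass
--         line_block.append(line)
--     else:
--         line_blocks.append(line_block)
--     return line_blocks
--
-- def is_match_in_list(line:str,sepalete_list:list[str]):
--     for i in range(len(sepalete_list)):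
--         chk = sepalete_list[i]
--         line = line.replace('\n','')
--         if line == chk:
--             return True
--     return False
-- ===== SOURCE B (Python) =====
-- # Two-phase: collect the separator indices in one pass, then cut the list into
-- # slices at those indices (each separator line starts its own block).
-- def sepalate_value(lines: list[str], sepalete_list: list[str]):
--     seps = set(sepalete_list)
--     cuts = [i for i, line in enumerate(lines) if line.replace('\n', '') in seps]
--     bounds = [0] + cuts + [len(lines)]
--     return [lines[a:b] for a, b in zip(bounds, bounds[1:])]
-- ===== Notes on version B (the rewrite author's own statement) =====
-- stated objective: faster
-- what changed: B makes one pass collecting the indices of separator lines into a set-backed filter, then cuts the input into blocks by slicing between consecutive boundary indices, instead of A's single loop that grows a (blocks, current-block) accumulator pair and rescans the separator list (re-stripping the line) for every line.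
import Mathlib
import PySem

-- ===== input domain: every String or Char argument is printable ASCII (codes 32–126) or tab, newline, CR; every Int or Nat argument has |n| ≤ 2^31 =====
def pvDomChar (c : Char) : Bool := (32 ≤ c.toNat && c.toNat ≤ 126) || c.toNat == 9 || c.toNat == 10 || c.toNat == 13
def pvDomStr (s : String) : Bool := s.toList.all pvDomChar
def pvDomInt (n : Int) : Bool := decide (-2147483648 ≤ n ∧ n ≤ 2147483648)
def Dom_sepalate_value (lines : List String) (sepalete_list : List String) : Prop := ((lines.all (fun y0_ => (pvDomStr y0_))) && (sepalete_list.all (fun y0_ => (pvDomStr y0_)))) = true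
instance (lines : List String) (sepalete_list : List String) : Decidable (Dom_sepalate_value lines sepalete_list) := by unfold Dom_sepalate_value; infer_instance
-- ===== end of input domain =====

-- B collects separator indices in one pass and cuts the list into slices at those
-- boundaries, instead of A's accumulator loop with a list-rescanning membership helper
-- (objective: faster membership via a set built once plus slicing).


-- ===== PORT A =====
-- helper is_match_in_list: loop over sepalete_list, re-stripping '\n' from line each iteration
def pvIsMatchInList (line : String) : List String → Bool
  | [] => false
  | chk :: rest =>
    let line' := PySem.Str.replace line "\n" ""
    if line' == chk then true else pvIsMatchInList line' rest

-- the for-loop of A: state is (line_blocks, line_block)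
def pvGoA (sepalete_list : List String) (line_blocks : List (List String)) (line_block : List String) : List String → List (List String)
  | [] => line_blocks ++ [line_block]
  | line :: rest =>
    if pvIsMatchInList line sepalete_list then
      pvGoA sepalete_list (line_blocks ++ [line_block]) ([] ++ [line]) rest
    else
      pvGoA sepalete_list line_blocks (line_block ++ [line]) rest

def sepalate_value (lines : List String) (sepalete_list : List String) : List (List String) :=
  pvGoA sepalete_list [] [] lines

-- ===== PORT B =====
-- seps = set(...); cuts = indices of separator lines; bounds = [0]+cuts+[len];
-- blocks = [lines[a:b] for a, b in zip(bounds, bounds[1:])]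
def sepalate_value_alt (lines : List String) (sepalete_list : List String) : List (List String) :=
  let seps := PySem.Set.ofList sepalete_list
  let cuts := ((PySem.List.enumerate lines).filter
      (fun p => seps.contains (PySem.Str.replace p.2 "\n" ""))).map (fun p => p.1)
  let bounds := (0 : Int) :: (cuts ++ [PySem.List.len lines])
  (bounds.zip (bounds.drop 1)).map (fun p => PySem.List.slice lines (some p.1) (some p.2))

-- ===== PRECONDITION & SPEC =====
def Spec_sepalate_value (lines : List String) (sepalete_list : List String) (out : List (List String)) : Prop := out = sepalate_value_alt lines sepalete_list
instance (lines : List String) (sepalete_list : List String) (out : List (List String)) : Decidable (Spec_sepalate_value lines sepalete_list out) := by unfold Spec_sepalate_value; infer_instance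

-- ===== CLAIM (what is proved, stated in full; the proofs are below) =====
def Claim_equal_sepalate_value : Prop := ∀ (lines : List String) (sepalete_list : List String), Dom_sepalate_value lines sepalete_list → Spec_sepalate_value lines sepalete_list (sepalate_value lines sepalete_list)

-- ===== LEMMAS AND PROOFS =====

-- the membership test both programs agree on
def pvM (sepalete_list : List String) (line : String) : Bool :=
  (PySem.Set.ofList sepalete_list).contains (PySem.Str.replace line "\n" "")

-- common recursive specification: blocks, each separator line starting its block
def pvConsHead (line : String) : List (List String) → List (List String)
  | [] => [[line]]
  | b :: bs => (line :: b) :: bs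

def pvF (sepalete_list : List String) : List String → List (List String)
  | [] => [[]]
  | line :: rest =>
    let F' := pvConsHead line (pvF sepalete_list rest)
    if pvM sepalete_list line then [] :: F' else F'

-- nat-level cut indices and slicing used to relate B's port to pvF
def pvNCuts (sepalete_list : List String) : List String → List Nat
  | [] => []
  | line :: rest =>
    (if pvM sepalete_list line then [0] else []) ++ (pvNCuts sepalete_list rest).map (· + 1)

def pvG (lines : List String) (p : Nat × Nat) : List String :=
  (lines.drop p.1).take (p.2 - p.1)

def pvNBlocks (lines : List String) (cs : List Nat) : List (List String) :=
  ((0 :: (cs ++ [lines.length])).zip (cs ++ [lines.length])).map (pvG lines)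

-- ---- A-side lemmas ----

-- replace.go with old = ['\n'], new = [] and enough fuel is just a filter
theorem pvReplaceGo_filter : ∀ (fuel : Nat) (l acc : List Char), l.length ≤ fuel →
    PySem.Chars.replace.go ['\n'] [] fuel l acc = acc.reverse ++ l.filter (fun c => !(c == '\n')) := by
  intro fuel
  induction fuel with
  | zero => intro l acc h; rw [Nat.le_zero, List.length_eq_zero_iff] at h; subst h; simp [PySem.Chars.replace.go]
  | succ n ih =>
    intro l acc h
    cases l with
    | nil => simp [PySem.Chars.replace.go]
    | cons c t =>
      simp only [List.length_cons, Nat.succ_le_succ_iff] at h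
      by_cases hc : c = '\n'
      · subst hc
        have hp : List.isPrefixOf ['\n'] ('\n' :: t) = true := by simp [List.isPrefixOf]
        simp only [PySem.Chars.replace.go, hp, if_pos, List.length_cons, List.length_nil,
          List.drop_succ_cons, List.drop_zero, List.reverse_nil, List.nil_append]
        rw [ih t acc (by simpa using h)]
        simp
      · have hp : List.isPrefixOf ['\n'] (c :: t) = false := by
          simp [List.isPrefixOf]; exact fun hh => (hc hh.symm).elim
        simp only [PySem.Chars.replace.go, hp]
        rw [if_neg (by simp), ih t (c :: acc) h]
        simp [hc]

theorem pvStrip_toList (s : String) :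
    (PySem.Str.replace s "\n" "").toList = s.toList.filter (fun c => !(c == '\n')) := by
  rw [PySem.Str.toList_replace]
  show PySem.Chars.replace s.toList ['\n'] [] = _
  rw [PySem.Chars.replace]
  simp only [List.isEmpty_iff, reduceCtorEq, if_false]
  exact pvReplaceGo_filter s.toList.length s.toList [] le_rfl

theorem pvStrip_idem (s : String) :
    PySem.Str.replace (PySem.Str.replace s "\n" "") "\n" "" = PySem.Str.replace s "\n" "" := by
  have h := pvStrip_toList (PySem.Str.replace s "\n" "")
  rw [pvStrip_toList s, List.filter_filter] at h
  have h2 : (PySem.Str.replace (PySem.Str.replace s "\n" "") "\n" "").toList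
      = (PySem.Str.replace s "\n" "").toList := by
    rw [h, pvStrip_toList s]; simp
  exact String.toList_inj.mp h2

theorem pvIsMatch_eq (sepalete_list : List String) : ∀ (line : String),
    pvIsMatchInList line sepalete_list = pvM sepalete_list line := by
  have hl : ∀ line, pvIsMatchInList line sepalete_list
      = sepalete_list.contains (PySem.Str.replace line "\n" "") := by
    induction sepalete_list with
    | nil => intro line; simp [pvIsMatchInList]
    | cons chk rest ih =>
      intro line
      simp only [pvIsMatchInList, List.contains_cons]
      by_cases hc : PySem.Str.replace line "\n" "" = chk
      · simp [hc]
      · have hb : ((PySem.Str.replace line "\n" "" : String) == chk) = false := by simp [hc]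
        have hb2 : (chk == PySem.Str.replace line "\n" "") = false := by simp [Ne.symm hc]
        rw [if_neg (by simp [hb]), ih, pvStrip_idem]
        simp [hb]
  intro line
  rw [hl, pvM]
  simp [List.contains_eq_mem, PySem.Set.mem_ofList]

-- prepend a finished partial block onto the head of a block list (proof-only helper)
def pvCatHead (c : List String) : List (List String) → List (List String)
  | [] => [c]
  | b :: bs => (c ++ b) :: bs

theorem pvCatHead_consHead (c : List String) (l : String) (F : List (List String)) :
    pvCatHead c (pvConsHead l F) = pvCatHead (c ++ [l]) F := by
  cases F <;> simp [pvCatHead, pvConsHead]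

theorem pvCatHead_singleton (l : String) (F : List (List String)) :
    pvCatHead [l] F = pvConsHead l F := by
  cases F <;> simp [pvCatHead, pvConsHead]

theorem pvGoA_eq (sepalete_list : List String) : ∀ (lines : List String)
    (blocks : List (List String)) (block : List String),
    pvGoA sepalete_list blocks block lines
      = blocks ++ pvCatHead block (pvF sepalete_list lines) := by
  intro lines
  induction lines with
  | nil => intro blocks block; simp [pvGoA, pvF, pvCatHead]
  | cons line rest ih =>
    intro blocks block
    simp only [pvGoA, pvF]
    rw [pvIsMatch_eq]
    by_cases hc : pvM sepalete_list line
    · rw [if_pos hc, if_pos hc, ih]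
      rw [List.nil_append, pvCatHead_singleton, List.append_assoc]
      cases pvF sepalete_list rest <;> simp [pvCatHead, pvConsHead]
    · rw [if_neg hc, if_neg hc, ih, pvCatHead_consHead]

theorem pvF_ne_nil (sepalete_list lines : List String) :
    pvF sepalete_list lines ≠ [] := by
  cases lines with
  | nil => simp [pvF]
  | cons line rest =>
    simp only [pvF]
    split
    · simp
    · cases pvF sepalete_list rest <;> simp [pvConsHead]

-- ---- B-side lemmas ----

-- the index list B's filter/map pass computes, shifted by the enumerate start
theorem pvEnum_cuts (sl : List String) : ∀ (xs : List String) (s : Int),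
    ((PySem.List.enumerate xs s).filter (fun p => pvM sl p.2)).map (fun p => p.1)
      = (pvNCuts sl xs).map (fun (k : Nat) => (k : Int) + s) := by
  intro xs
  induction xs with
  | nil => intro s; simp [PySem.List.enumerate_nil, pvNCuts]
  | cons x rest ih =>
    intro s
    rw [PySem.List.enumerate_cons, List.filter_cons]
    by_cases hx : pvM sl x
    · rw [if_pos (by exact hx), List.map_cons, ih (s + 1)]
      simp only [pvNCuts, hx, if_pos, List.singleton_append, List.map_cons, List.map_map]
      congr 1
      · push_cast; ring
      · exact List.map_congr_left (fun k _ => by simp only [Function.comp_apply]; push_cast; ring)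
    · rw [if_neg (by simp [hx]), ih (s + 1)]
      simp only [pvNCuts, hx, Bool.false_eq_true, if_false, List.nil_append, List.map_map]
      exact List.map_congr_left (fun k _ => by simp only [Function.comp_apply]; push_cast; ring)

theorem pvG_shift (l : String) (rest : List String) (a b : Nat) :
    pvG (l :: rest) (a + 1, b + 1) = pvG rest (a, b) := by
  simp [pvG, Nat.succ_sub_succ]

theorem pvG_head (l : String) (rest : List String) (z : Nat) :
    pvG (l :: rest) (0, z + 1) = l :: pvG rest (0, z) := by
  simp [pvG]

theorem pvNBlocks_eq (sl : List String) : ∀ (lines : List String),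
    pvNBlocks lines (pvNCuts sl lines) = pvF sl lines := by
  intro lines
  induction lines with
  | nil => simp [pvNBlocks, pvNCuts, pvG, pvF]
  | cons l rest ih =>
    rcases hys : pvNCuts sl rest ++ [rest.length] with _ | ⟨z, zs⟩
    · exact absurd hys (by simp)
    have hmap : (pvNCuts sl rest).map (· + 1) ++ [rest.length + 1]
        = (z + 1) :: zs.map (· + 1) := by
      have h := congrArg (List.map (· + 1)) hys
      simpa using h
    have hzip : ((((z + 1) :: zs.map (· + 1)).zip (zs.map (· + 1))).map (pvG (l :: rest)))
        = ((z :: zs).zip zs).map (pvG rest) := by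
      have h1 : ((z + 1) :: zs.map (· + 1)) = (z :: zs).map (· + 1) := by simp
      rw [h1, List.zip_map, List.map_map]
      refine List.map_congr_left ?_
      rintro ⟨a, b⟩ _
      exact pvG_shift l rest a b
    have hIH : pvG rest (0, z) :: ((z :: zs).zip zs).map (pvG rest) = pvF sl rest := by
      have h := ih
      rw [pvNBlocks, hys, List.zip_cons_cons, List.map_cons] at h
      exact h
    by_cases hm : pvM sl l
    · have hcuts : pvNCuts sl (l :: rest) = 0 :: (pvNCuts sl rest).map (· + 1) := by
        simp [pvNCuts, hm]
      rw [pvNBlocks, hcuts, List.length_cons, List.cons_append, hmap,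
        List.zip_cons_cons, List.zip_cons_cons, List.map_cons, List.map_cons, hzip, pvG_head]
      have h0 : pvG (l :: rest) (0, 0) = [] := by simp [pvG]
      rw [h0]
      simp only [pvF, hm, if_true]
      rw [← hIH]
      simp [pvConsHead]
    · have hcuts : pvNCuts sl (l :: rest) = (pvNCuts sl rest).map (· + 1) := by
        simp [pvNCuts, hm]
      rw [pvNBlocks, hcuts, List.length_cons, hmap,
        List.zip_cons_cons, List.map_cons, hzip, pvG_head]
      simp only [pvF, hm, Bool.false_eq_true, if_false]
      rw [← hIH]
      simp [pvConsHead]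

theorem pvAlt_eq (lines sl : List String) :
    sepalate_value_alt lines sl = pvNBlocks lines (pvNCuts sl lines) := by
  have h := pvEnum_cuts sl lines 0
  simp only [pvM] at h
  have hc : ((PySem.List.enumerate lines).filter
        (fun p => (PySem.Set.ofList sl).contains (PySem.Str.replace p.2 "\n" ""))).map
          (fun p => p.1)
      = (pvNCuts sl lines).map (fun (k : Nat) => (k : Int)) := by
    rw [h]
    exact List.map_congr_left (fun k _ => add_zero _)
  simp only [sepalate_value_alt]
  rw [hc]
  have hlen : PySem.List.len lines = ((lines.length : Nat) : Int) := rfl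
  rw [hlen]
  have hb : (0 : Int) :: ((pvNCuts sl lines).map (fun (k : Nat) => (k : Int)) ++ [((lines.length : Nat) : Int)])
      = (0 :: (pvNCuts sl lines ++ [lines.length])).map (fun (k : Nat) => (k : Int)) := by
    rw [List.map_cons, List.map_append, List.map_singleton]
    rfl
  have hb2 : ((pvNCuts sl lines).map (fun (k : Nat) => (k : Int)) ++ [((lines.length : Nat) : Int)])
      = (pvNCuts sl lines ++ [lines.length]).map (fun (k : Nat) => (k : Int)) := by
    rw [List.map_append, List.map_singleton]
  have hdrop : (((0 : Int) :: ((pvNCuts sl lines).map (fun (k : Nat) => (k : Int)) ++ [((lines.length : Nat) : Int)])).drop 1)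
      = (pvNCuts sl lines ++ [lines.length]).map (fun (k : Nat) => (k : Int)) := by
    rw [List.drop_one, List.tail_cons, hb2]
  rw [hdrop, hb, List.zip_map, List.map_map, pvNBlocks]
  refine List.map_congr_left ?_
  rintro ⟨a, b⟩ _
  show PySem.List.slice lines (some (a : Int)) (some (b : Int)) = pvG lines (a, b)
  rw [PySem.List.slice_natCast]
  rfl

-- ===== VERDICT (by name: the statement is the Claim_ definition above) =====
theorem sepalate_value_spec : Claim_equal_sepalate_value := by
  intro lines sepalete_list _
  show sepalate_value lines sepalete_list = sepalate_value_alt lines sepalete_list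
  rw [sepalate_value, pvGoA_eq, pvAlt_eq, pvNBlocks_eq, List.nil_append]
  rcases h : pvF sepalete_list lines with _ | ⟨b, bs⟩
  · exact absurd h (pvF_ne_nil sepalete_list lines)
  · simp [pvCatHead]
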